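-- pv_equiv track=rewrite | github.com/wrha51/DSE | hda/analysis.py | reorder_BFS
-- ===== SOURCE A (Python) =====
-- def reorder_BFS(cur_model_list):
--     temp_list1 = []
--     temp_list2 = []
--     cur_model = cur_model_list[0][1]
--     for model in cur_model_list:
--         if model[1] == cur_model:
--             temp_list2.append(model)
--         else:
--             temp_list1.append(model)
--
--     return temp_list1 + temp_list2
-- ===== SOURCE B (Python) =====
-- def reorder_BFS(cur_model_list):
--     cur_model = cur_model_list[0][1]
--     return sorted(cur_model_list, key=lambda m: m[1] == cur_model)
-- ===== Notes on version B (the rewrite author's own statement) =====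
-- stated objective: idiomatic
-- what changed: Replaces the two-bucket partition loop and concatenation with a single stable sort on the boolean key (m[1] == cur_model): False (non-matching) elements come first, True (matching) last, each group in original order.
import Mathlib
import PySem

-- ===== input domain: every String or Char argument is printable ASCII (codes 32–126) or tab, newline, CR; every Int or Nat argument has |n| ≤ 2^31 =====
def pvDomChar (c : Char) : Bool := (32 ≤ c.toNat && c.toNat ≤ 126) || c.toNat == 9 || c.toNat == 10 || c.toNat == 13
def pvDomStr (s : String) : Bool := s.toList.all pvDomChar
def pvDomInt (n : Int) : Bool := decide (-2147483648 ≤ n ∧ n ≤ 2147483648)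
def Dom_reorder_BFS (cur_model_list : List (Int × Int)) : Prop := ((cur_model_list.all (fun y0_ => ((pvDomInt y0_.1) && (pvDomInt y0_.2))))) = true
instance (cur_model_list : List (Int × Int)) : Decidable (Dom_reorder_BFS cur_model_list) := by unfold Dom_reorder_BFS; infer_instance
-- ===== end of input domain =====

-- B replaces A's two-bucket partition loop with one stable sort on the boolean key
-- m.2 == cur_model (idiomatic: non-matching elements first, matching last, order kept).


-- ===== PORT A =====
def reorder_BFS (cur_model_list : List (Int × Int)) : List (Int × Int) :=
  match PySem.List.pyGet? cur_model_list 0 with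
  | none => []   -- IndexError on the empty list; excluded by Pre_
  | some first =>
    let cur_model := first.2
    let p := cur_model_list.foldl
      (fun (acc : List (Int × Int) × List (Int × Int)) model =>
        if model.2 = cur_model then (acc.1, acc.2 ++ [model]) else (acc.1 ++ [model], acc.2))
      ([], [])
    p.1 ++ p.2

-- ===== PORT B =====
def reorder_BFS_alt (cur_model_list : List (Int × Int)) : List (Int × Int) :=
  match PySem.List.pyGet? cur_model_list 0 with
  | none => []   -- IndexError on the empty list; excluded by Pre_
  | some first =>
    let cur_model := first.2
    PySem.List.sorted cur_model_list (fun m => (decide (m.2 = cur_model) : Bool))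

-- ===== PRECONDITION & SPEC =====
-- A raises IndexError on the empty list (cur_model_list[0]); Pre_ excludes exactly that input.
def Pre_reorder_BFS (cur_model_list : List (Int × Int)) : Prop := cur_model_list ≠ []
instance (cur_model_list : List (Int × Int)) : Decidable (Pre_reorder_BFS cur_model_list) := by unfold Pre_reorder_BFS; infer_instance
def pvWitness_reorder_BFS : (List (Int × Int)) := [(1, 2), (3, 4), (5, 2)]

def Spec_reorder_BFS (cur_model_list : List (Int × Int)) (out : List (Int × Int)) : Prop := out = reorder_BFS_alt cur_model_list
instance (cur_model_list : List (Int × Int)) (out : List (Int × Int)) : Decidable (Spec_reorder_BFS cur_model_list out) := by unfold Spec_reorder_BFS; infer_instance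

-- ===== CLAIM (what is proved, stated in full; the proofs are below) =====
def Claim_equal_reorder_BFS : Prop := ∀ (cur_model_list : List (Int × Int)), Dom_reorder_BFS cur_model_list → Pre_reorder_BFS cur_model_list → Spec_reorder_BFS cur_model_list (reorder_BFS cur_model_list)

-- ===== LEMMAS AND PROOFS =====

-- A's partition loop produces the two filters, appended to the accumulators.
theorem foldA (cur : Int) : ∀ (xs : List (Int × Int)) (a1 a2 : List (Int × Int)),
    xs.foldl
      (fun (acc : List (Int × Int) × List (Int × Int)) model =>
        if model.2 = cur then (acc.1, acc.2 ++ [model]) else (acc.1 ++ [model], acc.2))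
      (a1, a2)
    = (a1 ++ xs.filter (fun m => !decide (m.2 = cur)), a2 ++ xs.filter (fun m => decide (m.2 = cur))) := by
  intro xs
  induction xs with
  | nil => intro a1 a2; simp
  | cons x t ih =>
    intro a1 a2
    by_cases h : x.2 = cur <;> simp [h, ih]

-- insertBy walks past a prefix it never inserts before.
theorem insertBy_skip {α : Type} (before : α → α → Bool) (x : α) :
    ∀ (fls tru : List α), (∀ y ∈ fls, before x y = false) →
    PySem.List.insertBy before x (fls ++ tru) = fls ++ PySem.List.insertBy before x tru := by
  intro fls
  induction fls with
  | nil => intro tru _; simp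
  | cons f t ih =>
    intro tru h
    have hf : before x f = false := h f (by simp)
    simp [PySem.List.insertBy, hf]
    exact ih tru (fun y hy => h y (by simp [hy]))

-- Insertion sort on a boolean key is exactly the stable partition.
theorem foldB (key : (Int × Int) → Bool) : ∀ (xs : List (Int × Int)),
    xs.foldl (fun acc x => PySem.List.insertBy (fun a b => decide (key a < key b)) x acc) []
    = xs.filter (fun m => !key m) ++ xs.filter key := by
  intro xs
  induction xs using List.reverseRecOn with
  | nil => simp
  | append_singleton t x ih =>
    rw [List.foldl_append]
    simp only [List.foldl_cons, List.foldl_nil, ih]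
    by_cases hx : key x = true
    · rw [PySem.List.insertBy_of_forall_not_before _ _ _ (by
        intro y _; simp [hx])]
      simp [List.filter_append, hx]
    · have hx' : key x = false := by simpa using hx
      rw [insertBy_skip _ x (t.filter (fun m => !key m)) (t.filter key) (by
        intro y hy
        have : key y = false := by
          have := List.of_mem_filter hy; simpa using this
        simp [hx', this])]
      have htail : PySem.List.insertBy (fun a b => decide (key a < key b)) x (t.filter key)
          = x :: t.filter key := by
        cases htf : t.filter key with
        | nil => simp [PySem.List.insertBy]
        | cons y ys =>
          have hy : key y = true := by
            have : y ∈ t.filter key := by rw [htf]; simp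
            exact List.of_mem_filter this
          simp [PySem.List.insertBy, hy, hx']
      rw [htail]
      simp [List.filter_append, hx']

-- ===== VERDICT (by name: the statement is the Claim_ definition above) =====
theorem reorder_BFS_spec : Claim_equal_reorder_BFS := by
  intro xs _ hpre
  unfold Spec_reorder_BFS reorder_BFS reorder_BFS_alt
  cases xs with
  | nil => exact absurd rfl hpre
  | cons h t =>
    simp only [PySem.List.pyGet?, PySem.List.pyIdx?]
    norm_num
    rw [PySem.List.sorted_eq_foldl_insertBy, foldB, foldA]
    simp
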